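-- pv_equiv track=rewrite | github.com/brayangiraldo02/ADMON-VEHICULOS | ProjectPanamaBackend/utils/reports.py | agrupar_vehiculos_por_estado
-- ===== SOURCE A (Python) =====
-- def agrupar_vehiculos_por_estado(vehiculos):
--     vehiculos_por_estado_nombre = {}
--     for vehiculo in vehiculos:
--         estado_nombre = vehiculo["vehiculo_estado_nombre"]
--         if estado_nombre not in vehiculos_por_estado_nombre:
--             vehiculos_por_estado_nombre[estado_nombre] = {}
--         placa = vehiculo["vehiculo_placa"]
--         vehiculos_por_estado_nombre[estado_nombre][placa] = vehiculo
--     return vehiculos_por_estado_nombre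
-- ===== SOURCE B (Python) =====
-- def agrupar_vehiculos_por_estado(vehiculos):
--     estados = dict.fromkeys(v["vehiculo_estado_nombre"] for v in vehiculos)
--     return {
--         estado: {v["vehiculo_placa"]: v for v in vehiculos
--                  if v["vehiculo_estado_nombre"] == estado}
--         for estado in estados
--     }
-- ===== Notes on version B (the rewrite author's own statement) =====
-- stated objective: idiomatic
-- what changed: Replaces A's single flat pass that mutates a nested dict with a two-phase comprehension: first compute the distinct state names in first-encounter order, then build each state's plate->vehicle dict by a filtering pass over all vehicles.
import Mathlib
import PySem

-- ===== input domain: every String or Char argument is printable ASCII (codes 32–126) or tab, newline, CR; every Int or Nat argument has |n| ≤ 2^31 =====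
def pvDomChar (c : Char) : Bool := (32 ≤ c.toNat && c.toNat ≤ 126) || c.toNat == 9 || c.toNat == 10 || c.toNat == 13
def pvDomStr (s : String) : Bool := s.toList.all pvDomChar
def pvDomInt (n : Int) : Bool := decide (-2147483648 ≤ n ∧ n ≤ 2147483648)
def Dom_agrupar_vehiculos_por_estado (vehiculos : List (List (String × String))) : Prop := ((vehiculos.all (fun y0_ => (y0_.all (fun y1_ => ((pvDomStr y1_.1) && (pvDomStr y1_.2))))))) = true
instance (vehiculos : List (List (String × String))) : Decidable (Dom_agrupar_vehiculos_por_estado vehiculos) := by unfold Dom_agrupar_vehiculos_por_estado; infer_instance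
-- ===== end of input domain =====

-- B replaces A's single mutating pass with distinct-states-first + per-state filtering comprehensions (idiomatic, not faster).
-- A raises KeyError when a vehicle lacks one of the two keys; Pre_ excludes exactly those inputs (B raises there too).

-- ===== PORT A =====
-- vehiculo[k]: first-match association lookup; exact wherever Pre_ holds (KeyError inputs are excluded by Pre_).
def pvGetKey (v : List (String × String)) (k : String) : String :=
  (PySem.Dict.mk v).getD k ""

def agrupar_vehiculos_por_estado (vehiculos : List (List (String × String))) : List (String × List (String × List (String × String))) :=
  let d := vehiculos.foldl
    (fun d vehiculo =>
      let estado_nombre := pvGetKey vehiculo "vehiculo_estado_nombre"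
      let d := if d.contains estado_nombre then d else d.insert estado_nombre PySem.Dict.empty
      let placa := pvGetKey vehiculo "vehiculo_placa"
      -- d[estado][placa] = vehiculo  (modify: set inner dict's entry, keep outer position)
      d.modify estado_nombre PySem.Dict.empty (fun inner => inner.insert placa vehiculo))
    PySem.Dict.empty
  d.items.map (fun p => (p.1, p.2.items))

-- ===== PORT B =====
def agrupar_vehiculos_por_estado_alt (vehiculos : List (List (String × String))) : List (String × List (String × List (String × String))) :=
  let estados := PySem.Set.ofList (vehiculos.map (fun v => pvGetKey v "vehiculo_estado_nombre"))
  estados.map (fun estado =>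
    (estado,
      (PySem.Dict.ofList
        ((vehiculos.filter (fun v => pvGetKey v "vehiculo_estado_nombre" == estado)).map
          (fun v => (pvGetKey v "vehiculo_placa", v)))).items))

-- ===== PRECONDITION & SPEC =====
-- Pre_ excludes exactly the inputs where Python A raises KeyError: a vehicle missing one of the two keys.
def Pre_agrupar_vehiculos_por_estado (vehiculos : List (List (String × String))) : Prop :=
  (vehiculos.all (fun v => (PySem.Dict.mk v).contains "vehiculo_estado_nombre" && (PySem.Dict.mk v).contains "vehiculo_placa")) = true

instance (vehiculos : List (List (String × String))) : Decidable (Pre_agrupar_vehiculos_por_estado vehiculos) := by unfold Pre_agrupar_vehiculos_por_estado; infer_instance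

def pvWitness_agrupar_vehiculos_por_estado : (List (List (String × String))) :=
  [[("vehiculo_estado_nombre", "ACTIVO"), ("vehiculo_placa", "ABC123")],
   [("vehiculo_estado_nombre", "TALLER"), ("vehiculo_placa", "XYZ789")]]

def Spec_agrupar_vehiculos_por_estado (vehiculos : List (List (String × String))) (out : List (String × List (String × List (String × String)))) : Prop := out = agrupar_vehiculos_por_estado_alt vehiculos
instance (vehiculos : List (List (String × String))) (out : List (String × List (String × List (String × String)))) : Decidable (Spec_agrupar_vehiculos_por_estado vehiculos out) := by unfold Spec_agrupar_vehiculos_por_estado; infer_instance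

-- ===== CLAIM (what is proved, stated in full; the proofs are below) =====
def Claim_equal_agrupar_vehiculos_por_estado : Prop := ∀ (vehiculos : List (List (String × String))), Dom_agrupar_vehiculos_por_estado vehiculos → Pre_agrupar_vehiculos_por_estado vehiculos → Spec_agrupar_vehiculos_por_estado vehiculos (agrupar_vehiculos_por_estado vehiculos)

-- ===== LEMMAS AND PROOFS =====

-- A's loop body: the "insert {} if absent" guard followed by the nested assignment is exactly `modify`.
theorem pv_step_eq (d : PySem.Dict String (PySem.Dict String (List (String × String))))
    (e : String) (f : PySem.Dict String (List (String × String)) → PySem.Dict String (List (String × String))) :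
    (if d.contains e then d else d.insert e PySem.Dict.empty).modify e PySem.Dict.empty f
      = d.modify e PySem.Dict.empty f := by
  by_cases h : d.contains e
  · simp [h]
  · simp only [Bool.not_eq_true] at h
    simp only [h, Bool.false_eq_true, if_false]
    show (d.insert e PySem.Dict.empty).insert e (f ((d.insert e PySem.Dict.empty).getD e PySem.Dict.empty))
        = d.insert e (f (d.getD e PySem.Dict.empty))
    rw [PySem.Dict.getD_insert_self, PySem.Dict.insert_insert_self,
        PySem.Dict.getD_of_not_contains d PySem.Dict.empty h]

-- getD of the grouping fold: each state's inner dict is the insert-fold over the vehicles of that state.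
theorem pv_getD_fold (l : List (List (String × String)))
    (d : PySem.Dict String (PySem.Dict String (List (String × String)))) (e : String) :
    (l.foldl (fun d v => d.modify (pvGetKey v "vehiculo_estado_nombre") PySem.Dict.empty
        (fun inner => inner.insert (pvGetKey v "vehiculo_placa") v)) d).getD e PySem.Dict.empty
      = (l.filter (fun v => pvGetKey v "vehiculo_estado_nombre" == e)).foldl
          (fun inner v => inner.insert (pvGetKey v "vehiculo_placa") v) (d.getD e PySem.Dict.empty) := by
  induction l generalizing d with
  | nil => rfl
  | cons v t ih =>
    simp only [List.foldl_cons, List.filter_cons]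
    by_cases h : pvGetKey v "vehiculo_estado_nombre" = e
    · subst h
      simp only [beq_self_eq_true, if_true, List.foldl_cons, ih, PySem.Dict.getD_modify_self]
    · have hb : (pvGetKey v "vehiculo_estado_nombre" == e) = false := by
        simp [h]
      simp only [hb, Bool.false_eq_true, if_false]
      rw [ih, PySem.Dict.getD_modify_of_ne _ _ _ (fun he => h he.symm)]

theorem pv_ofList_eq_foldl (pairs : List (String × List (String × String))) :
    PySem.Dict.ofList pairs
      = pairs.foldl (fun d p => d.insert p.1 p.2) PySem.Dict.empty := rfl

-- ===== VERDICT (by name: the statement is the Claim_ definition above) =====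
theorem agrupar_vehiculos_por_estado_spec : Claim_equal_agrupar_vehiculos_por_estado := by
  intro vehiculos _ _
  show agrupar_vehiculos_por_estado vehiculos = agrupar_vehiculos_por_estado_alt vehiculos
  unfold agrupar_vehiculos_por_estado agrupar_vehiculos_por_estado_alt
  simp only []
  -- replace A's loop body by the single `modify` step
  have hstep :
      (fun (d : PySem.Dict String (PySem.Dict String (List (String × String)))) vehiculo =>
        let estado_nombre := pvGetKey vehiculo "vehiculo_estado_nombre"
        let d' := if d.contains estado_nombre then d else d.insert estado_nombre PySem.Dict.empty
        let placa := pvGetKey vehiculo "vehiculo_placa"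
        d'.modify estado_nombre PySem.Dict.empty (fun (inner : PySem.Dict String (List (String × String))) => inner.insert placa vehiculo))
      = (fun d v => d.modify (pvGetKey v "vehiculo_estado_nombre") PySem.Dict.empty
          (fun inner => inner.insert (pvGetKey v "vehiculo_placa") v)) := by
    funext d v
    exact pv_step_eq d _ _
  rw [hstep]
  set D := vehiculos.foldl (fun d v => d.modify (pvGetKey v "vehiculo_estado_nombre") PySem.Dict.empty
      (fun inner => inner.insert (pvGetKey v "vehiculo_placa") v)) PySem.Dict.empty with hD
  have hnodup : D.keys.Nodup := by
    rw [hD]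
    exact PySem.Dict.nodup_keys_foldl_modify_key vehiculos _ _
      (fun _ v => (fun (inner : PySem.Dict String (List (String × String))) => inner.insert (pvGetKey v "vehiculo_placa") v)) _
      PySem.Dict.nodup_keys_empty
  have hkeys : D.keys = PySem.Set.ofList (vehiculos.map (fun v => pvGetKey v "vehiculo_estado_nombre")) := by
    rw [hD, PySem.Dict.keys_foldl_modify_key vehiculos _ _
      (fun _ v => (fun (inner : PySem.Dict String (List (String × String))) => inner.insert (pvGetKey v "vehiculo_placa") v))]
    rw [PySem.Dict.keys_empty, PySem.Set.update_nil_left]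
  rw [PySem.Dict.items_eq_map_keys D hnodup PySem.Dict.empty, hkeys, List.map_map]
  refine List.map_congr_left (fun e _ => ?_)
  simp only [Function.comp]
  congr 1
  rw [hD, pv_getD_fold, PySem.Dict.getD_empty, pv_ofList_eq_foldl, List.foldl_map]
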